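-- pv_equiv track=rewrite | github.com/highing666/leaving | src/leetcode/91lalg/triple_inversion.py | solve
-- ===== SOURCE A (Python) =====
-- from bisect import bisect_right, insort
--
-- def solve(nums):
-- 	d = list()
-- 	ans = 0
--
-- 	for num in nums:
-- 		i = bisect_right(d, num * 3)
-- 		ans += len(d) - i
-- 		insort(d, num)
--
-- 	return ans
-- ===== SOURCE B (Python) =====
-- from bisect import bisect_left
--
-- def solve(nums):
--     # merge-sort based counting: O(n log n) instead of A's insort-based O(n^2)
--     def sort_count(a):
--         n = len(a)
--         if n <= 1:
--             return a, 0
--         left, cl = sort_count(a[:n // 2])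
--         right, cr = sort_count(a[n // 2:])
--         cnt = cl + cr
--         right3 = [3 * y for y in right]
--         for x in left:
--             cnt += bisect_left(right3, x)
--         merged = []
--         i = k = 0
--         while i < len(left) and k < len(right):
--             if left[i] <= right[k]:
--                 merged.append(left[i]); i += 1
--             else:
--                 merged.append(right[k]); k += 1
--         merged += left[i:]
--         merged += right[k:]
--         return merged, cnt
--     return sort_count(nums)[1]
-- ===== Notes on version B (the rewrite author's own statement) =====
-- stated objective: faster
-- what changed: Replaced A's incremental sorted-list scan (insort + bisect per element, O(n) shifting each step) with divide-and-conquer merge-sort counting: each half is counted recursively and cross pairs are counted by bisecting into the sorted right half.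
import Mathlib
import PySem

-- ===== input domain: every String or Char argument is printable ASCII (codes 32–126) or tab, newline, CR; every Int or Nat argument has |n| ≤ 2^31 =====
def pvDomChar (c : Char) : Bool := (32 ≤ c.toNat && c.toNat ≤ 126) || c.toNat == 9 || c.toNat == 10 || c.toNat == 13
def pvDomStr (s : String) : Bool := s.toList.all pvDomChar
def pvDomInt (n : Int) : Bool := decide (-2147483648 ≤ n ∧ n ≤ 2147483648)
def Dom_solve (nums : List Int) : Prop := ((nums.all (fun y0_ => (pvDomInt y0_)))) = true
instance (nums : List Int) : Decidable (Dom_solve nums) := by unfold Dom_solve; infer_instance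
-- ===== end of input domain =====

-- B replaces A's insort/bisect O(n^2) scan with merge-sort counting (O(n log n)); equal on all inputs.


-- ===== PORT A =====
-- one loop iteration: i = bisect_right(d, num*3); ans += len(d) - i; insort(d, num)
-- (insort(d, num) is, by its documentation, d.insert(bisect_right(d, num), num))
def pvStepA (st : List Int × Int) (num : Int) : List Int × Int :=
  let i := PySem.List.bisectRight st.1 (num * 3)
  (PySem.List.insert st.1 ((PySem.List.bisectRight st.1 num : Nat) : Int) num,
   st.2 + ((st.1.length : Int) - (i : Int)))

def solve (nums : List Int) : Int :=
  (nums.foldl pvStepA ([], 0)).2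

-- ===== PORT B =====
-- Source B's hand-written merge loop (take the smaller head, left first on ties)
def pvMerge : List Int → List Int → List Int
  | [], r => r
  | l, [] => l
  | x :: l, y :: r => if x ≤ y then x :: pvMerge l (y :: r) else y :: pvMerge (x :: l) r

-- recursive sort_count: slices a[:n//2] / a[n//2:] are take/drop (n//2 ≥ 0, exact)
def sortCount (a : List Int) : List Int × Int :=
  if a.length ≤ 1 then (a, 0)
  else
    let l := sortCount (a.take (a.length / 2))
    let r := sortCount (a.drop (a.length / 2))
    let right3 := r.1.map (fun y => 3 * y)
    let cnt := l.2 + r.2 +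
      l.1.foldl (fun c x => c + ((PySem.List.bisectLeft right3 x : Nat) : Int)) 0
    (pvMerge l.1 r.1, cnt)
termination_by a.length
decreasing_by
  · simp only [List.length_take]; omega
  · simp only [List.length_drop]; omega

def solve_alt (nums : List Int) : Int := (sortCount nums).2

-- ===== PRECONDITION & SPEC =====
def Spec_solve (nums : List Int) (out : Int) : Prop := out = solve_alt nums
instance (nums : List Int) (out : Int) : Decidable (Spec_solve nums out) := by unfold Spec_solve; infer_instance

-- ===== CLAIM (what is proved, stated in full; the proofs are below) =====
def Claim_equal_solve : Prop := ∀ (nums : List Int), Dom_solve nums → Spec_solve nums (solve nums)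

-- ===== LEMMAS AND PROOFS =====

-- the common specification: number of pairs i < j with nums[i] > 3 * nums[j]
def pairs : List Int → Int
  | [] => 0
  | x :: t => ((t.countP (fun y => decide (3 * y < x)) : Nat) : Int) + pairs t

-- A-side generalized count: pairs (x earlier ∈ seen, y later ∈ rest) with x > 3y
def crossTo (seen rest : List Int) : Int :=
  (rest.map (fun y => ((seen.countP (fun x => decide (3 * y < x)) : Nat) : Int))).sum

-- B-side cross count: pairs (x ∈ l earlier, y ∈ r later) with x > 3y
def crossLR (l r : List Int) : Int :=
  (l.map (fun x => ((r.countP (fun y => decide (3 * y < x)) : Nat) : Int))).sum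

-- a countP pinned down by indexed prefix/suffix facts (as the bisect specs give them)
theorem countP_eq_of_indexed (l : List Int) (p : Int → Bool) (i : Nat) (hi : i ≤ l.length)
    (h1 : ∀ j (hj : j < l.length), j < i → p l[j] = true)
    (h2 : ∀ j (hj : j < l.length), i ≤ j → ¬ p l[j] = true) :
    l.countP p = i := by
  induction l generalizing i with
  | nil => simpa using (Nat.le_zero.mp (by simpa using hi)).symm
  | cons x t ih =>
    cases i with
    | zero =>
      have hx : ¬ p x = true := h2 0 (by simp) (Nat.zero_le _)
      have ht : t.countP p = 0 :=
        ih 0 (Nat.zero_le _) (by omega)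
          (fun j hj _ => by simpa using h2 (j + 1) (by simpa using Nat.succ_lt_succ hj) (Nat.zero_le _))
      simp [hx, ht]
    | succ k =>
      have hx : p x = true := h1 0 (by simp) (Nat.succ_pos _)
      have ht : t.countP p = k :=
        ih k (by simpa using hi)
          (fun j hj hji => by simpa using h1 (j + 1) (by simpa using Nat.succ_lt_succ hj) (by omega))
          (fun j hj hji => by simpa using h2 (j + 1) (by simpa using Nat.succ_lt_succ hj) (by omega))
      simp [hx, ht]

theorem bisectRight_eq_countP_le (d : List Int) (v : Int) (hs : d.Pairwise (· ≤ ·)) :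
    d.countP (fun x => decide (x ≤ v)) = PySem.List.bisectRight d v := by
  obtain ⟨hi, hlt, hgt⟩ := PySem.List.bisectRight_spec d v hs
  exact countP_eq_of_indexed d _ _ hi
    (fun j hj hji => by simpa using hlt j hj hji)
    (fun j hj hji => by simpa using hgt j hj hji)

theorem bisectLeft_eq_countP_lt (d : List Int) (v : Int) (hs : d.Pairwise (· ≤ ·)) :
    d.countP (fun x => decide (x < v)) = PySem.List.bisectLeft d v := by
  obtain ⟨hi, hlt, hgt⟩ := PySem.List.bisectLeft_spec d v hs
  exact countP_eq_of_indexed d _ _ hi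
    (fun j hj hji => by simpa using hlt j hj hji)
    (fun j hj hji => by simpa using hgt j hj hji)

theorem len_sub_bisectRight (d : List Int) (v : Int) (hs : d.Pairwise (· ≤ ·)) :
    (d.length : Int) - (PySem.List.bisectRight d v : Nat) =
      ((d.countP (fun x => decide (v < x)) : Nat) : Int) := by
  have hsplit := List.length_eq_countP_add_countP (l := d) (fun x => decide (x ≤ v))
  have hco : d.countP (fun a => decide (¬ (decide (a ≤ v)) = true)) =
      d.countP (fun x => decide (v < x)) := by
    apply List.countP_congr
    intro a _
    by_cases h : a ≤ v
    · simp [h]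
    · simp [h]; omega
  rw [← bisectRight_eq_countP_le d v hs]
  omega

-- insert at a valid position is take ++ v :: drop
theorem insert_eq_take_drop (l : List Int) (i : Int) (v : Int) (h0 : 0 ≤ i)
    (h2 : i ≤ l.length) :
    PySem.List.insert l i v = l.take i.toNat ++ v :: l.drop i.toNat := by
  simp only [PySem.List.insert, PySem.List.sliceIndices]
  norm_num
  split_ifs with h1
  · omega
  · have : min i (l.length : Int) = i := by omega
    rw [this]

theorem insort_perm (d : List Int) (v : Int) (hs : d.Pairwise (· ≤ ·)) :
    (PySem.List.insert d ((PySem.List.bisectRight d v : Nat) : Int) v).Perm (v :: d) := by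
  obtain ⟨hi, _, _⟩ := PySem.List.bisectRight_spec d v hs
  rw [insert_eq_take_drop d _ v (by positivity) (by exact_mod_cast hi)]
  simp only [Int.toNat_natCast]
  have h1 : (d.take (PySem.List.bisectRight d v) ++ v :: d.drop (PySem.List.bisectRight d v)).Perm
      (v :: (d.take (PySem.List.bisectRight d v) ++ d.drop (PySem.List.bisectRight d v))) :=
    List.perm_middle
  rwa [List.take_append_drop] at h1

theorem insort_sorted (d : List Int) (v : Int) (hs : d.Pairwise (· ≤ ·)) :
    (PySem.List.insert d ((PySem.List.bisectRight d v : Nat) : Int) v).Pairwise (· ≤ ·) := by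
  obtain ⟨hi, hle, hgt⟩ := PySem.List.bisectRight_spec d v hs
  rw [insert_eq_take_drop d _ v (by positivity) (by exact_mod_cast hi)]
  simp only [Int.toNat_natCast]
  set i := PySem.List.bisectRight d v with hidef
  have htk : ∀ x ∈ d.take i, x ≤ v := by
    intro x hx
    obtain ⟨j, hj, hxe⟩ := List.mem_iff_getElem.mp hx
    have hjlen : j < d.length := by
      have := List.length_take_le i d; omega
    have hji : j < i := by
      have := hj; simp only [List.length_take] at this; omega
    have := hle j hjlen hji
    rw [← hxe]; simpa [List.getElem_take] using this
  have hdr : ∀ y ∈ d.drop i, v < y := by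
    intro y hy
    obtain ⟨j, hj, hye⟩ := List.mem_iff_getElem.mp hy
    have hjlen : i + j < d.length := by
      simp only [List.length_drop] at hj; omega
    have := hgt (i + j) hjlen (Nat.le_add_right _ _)
    rw [← hye]; simpa [List.getElem_drop] using this
  rw [List.pairwise_append]
  refine ⟨List.Pairwise.sublist (List.take_sublist i d) hs, ?_, ?_⟩
  · rw [List.pairwise_cons]
    exact ⟨fun y hy => le_of_lt (hdr y hy), List.Pairwise.sublist (List.drop_sublist i d) hs⟩
  · intro x hx b hb
    rcases List.mem_cons.mp hb with rfl | hb
    · exact htk x hx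
    · exact le_trans (htk x hx) (le_of_lt (hdr b hb))

theorem crossTo_perm (d d' rest : List Int) (h : d.Perm d') :
    crossTo d rest = crossTo d' rest := by
  unfold crossTo
  congr 1
  exact List.map_congr_left (fun y _ => by rw [h.countP_eq])

theorem crossTo_cons (y : Int) (d t : List Int) :
    crossTo (y :: d) t = ((t.countP (fun z => decide (3 * z < y)) : Nat) : Int) + crossTo d t := by
  induction t with
  | nil => simp [crossTo]
  | cons z t ih =>
    simp only [crossTo, List.map_cons, List.sum_cons, List.countP_cons] at *
    rw [ih]
    by_cases h : 3 * z < y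
    · simp only [h, decide_true, if_true]
      push_cast
      ring
    · simp only [h, decide_false]
      push_cast
      ring

theorem crossTo_nil (rest : List Int) : crossTo [] rest = 0 := by
  induction rest with
  | nil => rfl
  | cons z t ih => simp [crossTo]

-- A's loop invariant: starting from any sorted d, the loop adds crossTo d rest + pairs rest
theorem foldA (rest : List Int) : ∀ (d : List Int) (ans : Int), d.Pairwise (· ≤ ·) →
    (rest.foldl pvStepA (d, ans)).2 = ans + crossTo d rest + pairs rest := by
  induction rest with
  | nil => intro d ans _; simp [crossTo, pairs]
  | cons y t ih =>
    intro d ans hs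
    simp only [List.foldl_cons]
    have hstep : pvStepA (d, ans) y =
        (PySem.List.insert d ((PySem.List.bisectRight d y : Nat) : Int) y,
         ans + ((d.length : Int) - (PySem.List.bisectRight d (y * 3) : Nat))) := rfl
    rw [hstep, ih _ _ (insort_sorted d y hs)]
    have h1 : ((d.length : Int) - (PySem.List.bisectRight d (y * 3) : Nat)) =
        ((d.countP (fun x => decide (y * 3 < x)) : Nat) : Int) :=
      len_sub_bisectRight d (y * 3) hs
    have h2 : crossTo (PySem.List.insert d ((PySem.List.bisectRight d y : Nat) : Int) y) t =
        ((t.countP (fun z => decide (3 * z < y)) : Nat) : Int) + crossTo d t := by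
      rw [crossTo_perm _ _ t (insort_perm d y hs), crossTo_cons]
    have h3 : crossTo d (y :: t) =
        ((d.countP (fun x => decide (3 * y < x)) : Nat) : Int) + crossTo d t := by
      simp [crossTo]
    have h4 : pairs (y :: t) =
        ((t.countP (fun z => decide (3 * z < y)) : Nat) : Int) + pairs t := rfl
    have h5 : (d.countP (fun x => decide (y * 3 < x))) = (d.countP (fun x => decide (3 * y < x))) := by
      apply List.countP_congr; intro a _; by_cases h : 3 * y < a <;> simp [h] <;> omega
    rw [h1, h2, h3, h4, h5]
    ring

theorem solve_eq_pairs (nums : List Int) : solve nums = pairs nums := by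
  unfold solve
  rw [foldA nums [] 0 (by simp), crossTo_nil]
  ring

-- B side
theorem pvMerge_perm (l r : List Int) : (pvMerge l r).Perm (l ++ r) := by
  induction l, r using pvMerge.induct with
  | case1 r => simp [pvMerge]
  | case2 l h => cases l with
    | nil => simp at h
    | cons x t => simp [pvMerge]
  | case3 x l y r hle ih =>
    simp only [pvMerge, if_pos hle]
    exact (ih.cons x).trans (by simp)
  | case4 x l y r hle ih =>
    simp only [pvMerge, if_neg hle]
    refine (ih.cons y).trans ?_
    calc (y :: (x :: l ++ r)).Perm (x :: l ++ y :: r) := List.perm_middle.symm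
      _ = (x :: l ++ y :: r) := rfl

theorem pvMerge_sorted (l r : List Int) (hl : l.Pairwise (· ≤ ·)) (hr : r.Pairwise (· ≤ ·)) :
    (pvMerge l r).Pairwise (· ≤ ·) := by
  induction l, r using pvMerge.induct with
  | case1 r => simpa [pvMerge]
  | case2 l h => cases l with
    | nil => simp at h
    | cons x t => simpa [pvMerge] using hl
  | case3 x l y r hle ih =>
    simp only [pvMerge, if_pos hle]
    rw [List.pairwise_cons]
    constructor
    · intro a ha
      have ha' : a ∈ l ++ y :: r := (pvMerge_perm l (y :: r)).mem_iff.mp ha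
      rcases List.mem_append.mp ha' with h | h
      · exact (List.pairwise_cons.mp hl).1 a h
      · rcases List.mem_cons.mp h with rfl | h
        · exact hle
        · exact le_trans hle ((List.pairwise_cons.mp hr).1 a h)
    · exact ih (List.pairwise_cons.mp hl).2 hr
  | case4 x l y r hle ih =>
    simp only [pvMerge, if_neg hle]
    rw [List.pairwise_cons]
    have hyx : y ≤ x := by omega
    constructor
    · intro a ha
      have ha' : a ∈ (x :: l) ++ r := (pvMerge_perm (x :: l) r).mem_iff.mp ha
      rcases List.mem_append.mp ha' with h | h
      · rcases List.mem_cons.mp h with rfl | h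
        · exact hyx
        · exact le_trans hyx ((List.pairwise_cons.mp hl).1 a h)
      · exact (List.pairwise_cons.mp hr).1 a h
    · exact ih hl (List.pairwise_cons.mp hr).2

theorem pairs_append (l r : List Int) : pairs (l ++ r) = pairs l + pairs r + crossLR l r := by
  induction l with
  | nil => simp [pairs, crossLR]
  | cons x t ih =>
    simp only [List.cons_append, pairs, List.countP_append, crossLR, List.map_cons,
      List.sum_cons] at *
    rw [ih]
    push_cast
    ring

theorem pairs_perm_left_invariant (l l' r : List Int) (h : l.Perm l') :
    crossLR l r = crossLR l' r := by
  unfold crossLR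
  exact (h.map _).sum_eq

theorem crossLR_perm_right (l r r' : List Int) (h : r.Perm r') :
    crossLR l r = crossLR l r' := by
  unfold crossLR
  congr 1
  exact List.map_congr_left (fun x _ => by rw [h.countP_eq])

theorem sortCount_spec (a : List Int) :
    (sortCount a).1.Perm a ∧ (sortCount a).1.Pairwise (· ≤ ·) ∧ (sortCount a).2 = pairs a := by
  induction a using sortCount.induct with
  | case1 a h =>
    rw [sortCount, if_pos h]
    match a, h with
    | [], _ => simp [pairs]
    | [x], _ => simp [pairs]
  | case2 a h ih1 ih2 =>
    rw [sortCount, if_neg h]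
    obtain ⟨hp1, hs1, hc1⟩ := ih1
    obtain ⟨hp2, hs2, hc2⟩ := ih2
    simp only
    set L := (sortCount (a.take (a.length / 2))).1 with hL
    set R := (sortCount (a.drop (a.length / 2))).1 with hR
    have hsplit : a.take (a.length / 2) ++ a.drop (a.length / 2) = a := List.take_append_drop _ _
    refine ⟨?_, pvMerge_sorted L R hs1 hs2, ?_⟩
    · exact (pvMerge_perm L R).trans (((hp1.append hp2).trans (by rw [hsplit])))
    · -- the counting part
      have hsorted3 : (R.map (fun y => 3 * y)).Pairwise (· ≤ ·) :=
        List.Pairwise.map _ (fun a b hab => by omega) hs2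
      have hfold : L.foldl (fun c x => c +
            ((PySem.List.bisectLeft (R.map (fun y => 3 * y)) x : Nat) : Int)) 0 = crossLR L R := by
        rw [PySem.List.foldl_add]
        unfold crossLR
        simp only [zero_add]
        congr 1
        apply List.map_congr_left
        intro x _
        rw [← bisectLeft_eq_countP_lt _ x hsorted3, List.countP_map]
        rfl
      rw [hfold, hc1, hc2,
        pairs_perm_left_invariant L _ R hp1, crossLR_perm_right _ R _ hp2,
        ← pairs_append, hsplit]

-- ===== VERDICT (by name: the statement is the Claim_ definition above) =====
theorem solve_spec : Claim_equal_solve := by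
  intro nums _
  unfold Spec_solve solve_alt
  rw [solve_eq_pairs, (sortCount_spec nums).2.2]
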